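-- pv_equiv track=rewrite | github.com/alonborn/BotGammon | backgammon/SW/AuxFunctions.py | create_diff_movements
-- ===== SOURCE A (Python) =====
-- def create_diff_movements(wrong_positions, correct_positions):
--     movements = []
--
--     # Iterate through the larger_positions list
--     for i, larger_pos in enumerate(wrong_positions):
--         # Get the corresponding smaller position if it exists
--         smaller_pos = correct_positions[i] if i < len(correct_positions) else -1
--         movements.append((larger_pos, smaller_pos))
--
--     # Add tuples for remaining smaller positions
--     for smaller_pos in correct_positions[len(wrong_positions):]:
--         movements.append((-1, smaller_pos))
--
--     return movements
-- ===== SOURCE B (Python) =====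
-- def create_diff_movements(wrong_positions, correct_positions):
--     n = max(len(wrong_positions), len(correct_positions))
--     return [(wrong_positions[i] if i < len(wrong_positions) else -1,
--              correct_positions[i] if i < len(correct_positions) else -1)
--             for i in range(n)]
-- ===== Notes on version B (the rewrite author's own statement) =====
-- stated objective: simpler
-- what changed: A traverses the data in two segments (a loop over wrong_positions plus a second loop over the leftover slice of correct_positions); B is a single comprehension over the unified index range 0..max(len,len) with conditional -1 padding on each side.
import Mathlib
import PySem

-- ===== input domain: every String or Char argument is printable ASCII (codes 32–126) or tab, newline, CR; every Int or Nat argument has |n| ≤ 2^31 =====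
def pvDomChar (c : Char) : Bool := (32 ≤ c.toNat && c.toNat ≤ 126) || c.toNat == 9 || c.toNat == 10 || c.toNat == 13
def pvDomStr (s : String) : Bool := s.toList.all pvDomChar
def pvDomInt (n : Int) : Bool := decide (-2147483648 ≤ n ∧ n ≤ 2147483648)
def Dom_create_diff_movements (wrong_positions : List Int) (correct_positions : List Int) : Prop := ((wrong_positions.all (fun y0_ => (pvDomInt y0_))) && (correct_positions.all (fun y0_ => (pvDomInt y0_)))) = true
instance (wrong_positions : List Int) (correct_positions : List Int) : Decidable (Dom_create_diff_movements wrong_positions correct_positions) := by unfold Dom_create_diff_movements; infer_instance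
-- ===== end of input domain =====

-- ===== PORT A =====
-- B replaces A's two-segment traversal by one comprehension over the combined index range; objective: simpler.
def create_diff_movements (wrong_positions : List Int) (correct_positions : List Int) : List (Int × Int) :=
  let movements : List (Int × Int) :=
    (PySem.List.enumerate wrong_positions).foldl (fun acc p =>
      acc ++ [(p.2, if p.1 < (correct_positions.length : Int)
                    then PySem.List.pyGetD correct_positions p.1 (-1) else -1)]) []
  -- correct_positions[len(wrong_positions):] = drop by a nonnegative in-range start (exact here)
  (correct_positions.drop wrong_positions.length).foldl
    (fun acc smaller_pos => acc ++ [((-1 : Int), smaller_pos)]) movements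

-- ===== PORT B =====
def create_diff_movements_alt (wrong_positions : List Int) (correct_positions : List Int) : List (Int × Int) :=
  let n : Int := max (wrong_positions.length : Int) (correct_positions.length : Int)
  (PySem.List.pyRange 0 n 1).map (fun i =>
    (if i < (wrong_positions.length : Int) then PySem.List.pyGetD wrong_positions i (-1) else -1,
     if i < (correct_positions.length : Int) then PySem.List.pyGetD correct_positions i (-1) else -1))

-- ===== PRECONDITION & SPEC =====
def Spec_create_diff_movements (wrong_positions : List Int) (correct_positions : List Int) (out : List (Int × Int)) : Prop := out = create_diff_movements_alt wrong_positions correct_positions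
instance (wrong_positions : List Int) (correct_positions : List Int) (out : List (Int × Int)) : Decidable (Spec_create_diff_movements wrong_positions correct_positions out) := by unfold Spec_create_diff_movements; infer_instance

-- ===== CLAIM (what is proved, stated in full; the proofs are below) =====
def Claim_equal_create_diff_movements : Prop := ∀ (wrong_positions : List Int) (correct_positions : List Int), Dom_create_diff_movements wrong_positions correct_positions → Spec_create_diff_movements wrong_positions correct_positions (create_diff_movements wrong_positions correct_positions)

-- ===== LEMMAS AND PROOFS =====

-- ===== VERDICT (by name: the statement is the Claim_ definition above) =====
theorem create_diff_movements_spec : Claim_equal_create_diff_movements := by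
  intro w c _
  unfold Spec_create_diff_movements create_diff_movements create_diff_movements_alt
  simp only [PySem.List.foldl_append_singleton_eq_map, List.nil_append,
    PySem.List.pyRange_one]
  apply List.ext_getElem
  · simp; omega
  · intro i h1 h2
    simp only [List.getElem_append, List.getElem_map, List.length_map,
      PySem.List.length_enumerate, PySem.List.getElem_enumerate, List.getElem_range,
      List.getElem_drop]
    have hlen : i < max w.length c.length := by
      simpa using h2
    split
    · rename_i hi
      simp only [Int.zero_add]
      have hiw : (i : Int) < (w.length : Int) := by exact_mod_cast hi
      rw [if_pos hiw]
      by_cases hic' : i < c.length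
      · have hic : (i : Int) < (c.length : Int) := by exact_mod_cast hic'
        rw [if_pos hic]
        simp [PySem.List.pyGetD_natCast, List.getD_eq_getElem?_getD,
          List.getElem?_eq_getElem hi, List.getElem?_eq_getElem hic']
      · have hic : ¬ ((i : Int) < (c.length : Int)) := by exact_mod_cast hic'
        rw [if_neg hic]
        simp [PySem.List.pyGetD_natCast, List.getD_eq_getElem?_getD,
          List.getElem?_eq_getElem hi]
    · rename_i hi
      rw [not_lt] at hi
      simp only [Int.zero_add]
      have hiw : ¬ ((i : Int) < (w.length : Int)) := by exact_mod_cast not_lt.mpr hi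
      have hic' : i < c.length := by omega
      have hic : (i : Int) < (c.length : Int) := by exact_mod_cast hic'
      rw [if_neg hiw, if_pos hic]
      simp [PySem.List.pyGetD_natCast, List.getD_eq_getElem?_getD,
        List.getElem?_eq_getElem hic', Nat.add_sub_cancel' hi]
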